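-- pv_equiv track=rewrite | github.com/kesyog/adventofcode2020 | day9/p9.py | part2
-- ===== SOURCE A (Python) =====
-- def part2(numbers, target):
--     for i, v in enumerate(numbers):
--         tot = v
--         nums = [v]
--         for j in range(i + 1, len(numbers)):
--             tot += numbers[j]
--             nums.append(numbers[j])
--             if tot == target:
--                 return v + max(nums)
--             else:
--                 if tot > target:
--                     break
-- ===== SOURCE B (Python) =====
-- def part2(numbers, target):
--     n = len(numbers)
--     prefix = [0]
--     for v in numbers:
--         prefix.append(prefix[-1] + v)
--
--     # Range-maximum segment tree over the prefix-sum array, so that for each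
--     # start the first window reaching the target is found by tree descent.
--     def build(lo, hi):
--         if hi - lo <= 1:
--             return (prefix[lo],)
--         mid = (lo + hi) // 2
--         left = build(lo, mid)
--         right = build(mid, hi)
--         return (max(left[0], right[0]), left, right)
--
--     def first_at_least(node, lo, hi, start, want):
--         # smallest k in [max(lo, start), hi) with prefix[k] >= want, else None
--         if hi <= start or node[0] < want:
--             return None
--         if len(node) == 1:
--             return lo
--         mid = (lo + hi) // 2
--         k = first_at_least(node[1], lo, mid, start, want)
--         if k is not None:
--             return k
--         return first_at_least(node[2], mid, hi, start, want)
--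
--     root = build(0, n + 1)
--     for i in range(n):
--         want = prefix[i] + target
--         k = first_at_least(root, 0, n + 1, i + 2, want)
--         if k is not None and prefix[k] == want:
--             return numbers[i] + max(numbers[i:k])
--     return None
-- ===== Notes on version B (the rewrite author's own statement) =====
-- stated objective: faster
-- what changed: Instead of restarting an accumulate-and-break scan at every start index, B computes the prefix-sum array once, builds a range-maximum segment tree over it, and for each start finds the first window end reaching the target by an O(log n) tree descent, then checks it for an exact hit.
import Mathlib
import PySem

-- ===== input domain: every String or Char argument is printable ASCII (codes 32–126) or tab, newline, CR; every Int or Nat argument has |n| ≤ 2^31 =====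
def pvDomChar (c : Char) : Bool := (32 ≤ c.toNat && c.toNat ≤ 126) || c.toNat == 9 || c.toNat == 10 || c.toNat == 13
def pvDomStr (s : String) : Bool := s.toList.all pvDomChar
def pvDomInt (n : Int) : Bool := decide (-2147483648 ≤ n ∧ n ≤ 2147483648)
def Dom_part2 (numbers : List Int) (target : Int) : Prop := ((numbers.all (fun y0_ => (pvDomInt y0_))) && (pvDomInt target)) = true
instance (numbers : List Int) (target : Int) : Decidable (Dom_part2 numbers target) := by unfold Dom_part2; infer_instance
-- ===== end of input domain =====

-- B replaces A's restart-and-accumulate quadratic scan by a prefix-sum array plus a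
-- range-maximum segment tree that finds each start's first window reaching the target
-- by tree descent (O(n log n)); an asymptotically different exact algorithm.

-- ===== PORT A =====
-- inner loop: tot/nums accumulate over the remaining elements; returns v+max(nums) on an exact hit
def part2InnerA (target v : Int) : Int → List Int → List Int → Option Int
  | _, _, [] => none
  | tot, nums, x :: rest =>
    if tot + x = target then
      match PySem.List.max? (nums ++ [x]) (fun y => y) with
      | some m => some (v + m)
      | none => none
    else if tot + x > target then none
    else part2InnerA target v (tot + x) (nums ++ [x]) rest

def part2OuterA (target : Int) : List Int → Option Int
  | [] => none
  | v :: rest =>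
    match part2InnerA target v v [v] rest with
    | some r => some r
    | none => part2OuterA target rest

def part2 (numbers : List Int) (target : Int) : Option Int :=
  part2OuterA target numbers

-- ===== PORT B =====
-- prefix = [0]; for v in numbers: prefix.append(prefix[-1] + v)
def buildPrefixB (numbers : List Int) : List Int :=
  numbers.foldl (fun p v => p ++ [p.getLastD 0 + v]) [0]

-- segment-tree node: (max,) leaf or (max, left, right)
inductive PTree : Type
  | leaf : Int → PTree
  | node : Int → PTree → PTree → PTree
deriving Repr

def PTree.top : PTree → Int
  | .leaf v => v
  | .node v _ _ => v

-- def build(lo, hi): recursive range-maximum tree over prefix[lo:hi]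
def buildT (pre : List Int) (lo hi : Nat) : PTree :=
  if hi - lo ≤ 1 then .leaf (pre.getD lo 0)
  else
    let mid := (lo + hi) / 2
    let l := buildT pre lo mid
    let r := buildT pre mid hi
    .node (max l.top r.top) l r
termination_by hi - lo
decreasing_by
  · omega
  · omega

-- def first_at_least(node, lo, hi, start, want)
def firstAtLeast : PTree → Nat → Nat → Nat → Int → Option Nat
  | .leaf v, lo, hi, start, want =>
    if hi ≤ start ∨ v < want then none else some lo
  | .node v l r, lo, hi, start, want =>
    if hi ≤ start ∨ v < want then none
    else
      let mid := (lo + hi) / 2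
      match firstAtLeast l lo mid start want with
      | some k => some k
      | none => firstAtLeast r mid hi start want

-- for i in range(n): look up the first prefix position >= want, test equality
def part2OuterB (numbers : List Int) (target : Int) (pre : List Int) (root : PTree)
    (n : Nat) : List Nat → Option Int
  | [] => none
  | i :: is =>
    let want := pre.getD i 0 + target
    match firstAtLeast root 0 (n + 1) (i + 2) want with
    | some k =>
      if pre.getD k 0 = want then
        match PySem.List.max? ((numbers.drop i).take (k - i)) (fun y => y) with
        | some m => some (numbers.getD i 0 + m)
        | none => none
      else part2OuterB numbers target pre root n is
    | none => part2OuterB numbers target pre root n is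

def part2_alt (numbers : List Int) (target : Int) : Option Int :=
  part2OuterB numbers target (buildPrefixB numbers)
    (buildT (buildPrefixB numbers) 0 (numbers.length + 1))
    numbers.length (List.range numbers.length)

-- ===== PRECONDITION & SPEC =====
def Spec_part2 (numbers : List Int) (target : Int) (out : Option Int) : Prop := out = part2_alt numbers target
instance (numbers : List Int) (target : Int) (out : Option Int) : Decidable (Spec_part2 numbers target out) := by unfold Spec_part2; infer_instance

-- ===== CLAIM (what is proved, stated in full; the proofs are below) =====
def Claim_equal_part2 : Prop := ∀ (numbers : List Int) (target : Int), Dom_part2 numbers target → Spec_part2 numbers target (part2 numbers target)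

-- ===== LEMMAS AND PROOFS =====

-- prefix sum of the first k elements
def PS (numbers : List Int) (k : Nat) : Int := (numbers.take k).sum

-- "start i hits exactly at end position k": window numbers[i:k] (length ≥ 2) sums to target
-- and no shorter window (length ≥ 2) from i reached or passed the target
def HitP (numbers : List Int) (target : Int) (i k : Nat) : Prop :=
  i + 2 ≤ k ∧ k ≤ numbers.length ∧ PS numbers k = PS numbers i + target ∧
  ∀ m, i + 2 ≤ m → m < k → PS numbers m < PS numbers i + target

lemma PS_succ (numbers : List Int) (k : Nat) (h : k < numbers.length) :
    PS numbers (k + 1) = PS numbers k + numbers[k] := by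
  simp [PS, List.sum_take_succ _ _ h]

-- ===== prefix array characterisation =====

lemma buildPrefixB_eq (numbers : List Int) :
    buildPrefixB numbers = (List.range (numbers.length + 1)).map (PS numbers) := by
  induction numbers using List.reverseRecOn with
  | nil => simp [buildPrefixB, PS]
  | append_singleton xs x ih =>
    have step : buildPrefixB (xs ++ [x]) =
        buildPrefixB xs ++ [(buildPrefixB xs).getLastD 0 + x] := by
      simp [buildPrefixB, List.foldl_append]
    rw [step, ih]
    have hlast : ((List.range (xs.length + 1)).map (PS xs)).getLastD 0 = PS xs xs.length := by
      rw [List.range_succ]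
      simp
    rw [hlast]
    have hlen : (xs ++ [x]).length = xs.length + 1 := by simp
    rw [hlen]
    conv_rhs => rw [List.range_succ, List.map_append]
    congr 1
    · apply List.map_congr_left
      intro a ha
      have ha' : a ≤ xs.length := by
        have := List.mem_range.mp ha; omega
      simp [PS, List.take_append_of_le_length ha']
    · have h2 : (xs ++ [x]).take (xs.length + 1) = xs ++ [x] := by
        apply List.take_of_length_le; simp
      have h3 : xs.take xs.length = xs := List.take_length
      simp [PS, h2, h3]

lemma getD_buildPrefixB (numbers : List Int) (k : Nat) (hk : k ≤ numbers.length) :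
    (buildPrefixB numbers).getD k 0 = PS numbers k := by
  rw [buildPrefixB_eq]
  rw [List.getD_eq_getElem?_getD, List.getElem?_map, List.getElem?_range (by omega : k < numbers.length + 1)]
  simp

-- ===== segment tree characterisation =====

lemma buildT_top_ge (pre : List Int) :
    ∀ (d lo hi : Nat), hi - lo ≤ d → lo < hi →
      ∀ k, lo ≤ k → k < hi → pre.getD k 0 ≤ (buildT pre lo hi).top := by
  intro d
  induction d with
  | zero => intro lo hi h1 h2; omega
  | succ d ih =>
    intro lo hi h1 h2 k hk1 hk2
    rw [buildT]
    by_cases hsmall : hi - lo ≤ 1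
    · have : k = lo := by omega
      rw [if_pos hsmall, this, PTree.top]
    · rw [if_neg hsmall]
      simp only [PTree.top]
      have hmid1 : lo < (lo + hi) / 2 := by omega
      have hmid2 : (lo + hi) / 2 < hi := by omega
      rcases Nat.lt_or_ge k ((lo + hi) / 2) with h | h
      · exact le_trans (ih lo ((lo + hi) / 2) (by omega) hmid1 k hk1 h) (le_max_left _ _)
      · exact le_trans (ih ((lo + hi) / 2) hi (by omega) hmid2 k h hk2) (le_max_right _ _)

-- firstAtLeast on the built tree returns the least k ≥ start in [lo, hi) with pre[k] ≥ want
lemma firstAtLeast_spec (pre : List Int) (want : Int) (start : Nat) :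
    ∀ (d lo hi : Nat), hi - lo ≤ d → lo < hi →
      (match firstAtLeast (buildT pre lo hi) lo hi start want with
       | some k => lo ≤ k ∧ start ≤ k ∧ k < hi ∧ want ≤ pre.getD k 0 ∧
           ∀ m, lo ≤ m → start ≤ m → m < k → pre.getD m 0 < want
       | none => ∀ m, lo ≤ m → start ≤ m → m < hi → pre.getD m 0 < want) := by
  intro d
  induction d with
  | zero => intro lo hi h1 h2; omega
  | succ d ih =>
    intro lo hi h1 h2
    by_cases hguard : hi ≤ start ∨ (buildT pre lo hi).top < want
    · have hnone : firstAtLeast (buildT pre lo hi) lo hi start want = none := by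
        cases htree : buildT pre lo hi with
        | leaf v => rw [htree] at hguard; simp only [PTree.top] at hguard
                    rw [firstAtLeast, if_pos hguard]
        | node v l r => rw [htree] at hguard; simp only [PTree.top] at hguard
                        rw [firstAtLeast, if_pos hguard]
      rw [hnone]
      intro m hm1 hm2 hm3
      rcases hguard with h | h
      · omega
      · exact lt_of_le_of_lt (buildT_top_ge pre (hi - lo) lo hi le_rfl h2 m hm1 hm3) h
    · by_cases hsmall : hi - lo ≤ 1
      · have hleaf : buildT pre lo hi = .leaf (pre.getD lo 0) := by
          rw [buildT, if_pos hsmall]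
        rw [hleaf] at hguard ⊢
        simp only [PTree.top] at hguard
        push_neg at hguard
        rw [firstAtLeast, if_neg (by push_neg; exact hguard)]
        exact ⟨le_rfl, by omega, h2, hguard.2, by omega⟩
      · have hnode : buildT pre lo hi =
            .node (max (buildT pre lo ((lo + hi) / 2)).top (buildT pre ((lo + hi) / 2) hi).top)
              (buildT pre lo ((lo + hi) / 2)) (buildT pre ((lo + hi) / 2) hi) := by
          rw [buildT, if_neg hsmall]
        rw [hnode] at hguard ⊢
        simp only [PTree.top] at hguard
        rw [firstAtLeast, if_neg (by push_neg at hguard ⊢; exact hguard)]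
        simp only []
        have hmid1 : lo < (lo + hi) / 2 := by omega
        have hmid2 : (lo + hi) / 2 < hi := by omega
        have hL := ih lo ((lo + hi) / 2) (by omega) hmid1
        have hR := ih ((lo + hi) / 2) hi (by omega) hmid2
        cases hcl : firstAtLeast (buildT pre lo ((lo + hi) / 2)) lo ((lo + hi) / 2) start want with
        | some k =>
          rw [hcl] at hL
          exact ⟨hL.1, hL.2.1, by omega, hL.2.2.2.1,
            fun m hm1 hm2 hm3 => hL.2.2.2.2 m hm1 hm2 hm3⟩
        | none =>
          rw [hcl] at hL
          cases hcr : firstAtLeast (buildT pre ((lo + hi) / 2) hi) ((lo + hi) / 2) hi start want with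
          | some k =>
            rw [hcr] at hR
            refine ⟨by omega, hR.2.1, hR.2.2.1, hR.2.2.2.1, ?_⟩
            intro m hm1 hm2 hm3
            rcases Nat.lt_or_ge m ((lo + hi) / 2) with h | h
            · exact hL m hm1 hm2 h
            · exact hR.2.2.2.2 m h hm2 hm3
          | none =>
            rw [hcr] at hR
            intro m hm1 hm2 hm3
            rcases Nat.lt_or_ge m ((lo + hi) / 2) with h | h
            · exact hL m hm1 hm2 h
            · exact hR m h hm2 hm3

-- ===== the inner-A loop vs HitP =====

lemma window_take_succ (numbers : List Int) (i j : Nat) (hij : i ≤ j) (hj : j < numbers.length) :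
    ((numbers.drop i).take (j - i)) ++ [numbers[j]] = (numbers.drop i).take (j + 1 - i) := by
  have hlen : j - i < (numbers.drop i).length := by simp [List.length_drop]; omega
  have hget : (numbers.drop i)[j - i] = numbers[j] := by
    rw [List.getElem_drop]
    congr 1; omega
  have : j + 1 - i = (j - i) + 1 := by omega
  rw [this, List.take_succ]
  rw [List.getElem?_eq_getElem hlen]
  simp [hget]

lemma innerA_hit (numbers : List Int) (target : Int) (i k : Nat)
    (hk : HitP numbers target i k) (m v : Int)
    (hm : PySem.List.max? ((numbers.drop i).take (k - i)) (fun y => y) = some m) :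
    ∀ (d j : Nat), k - j = d → i + 1 ≤ j → j < k →
      (∀ m', i + 2 ≤ m' → m' ≤ j → PS numbers m' < PS numbers i + target) →
      part2InnerA target v (PS numbers j - PS numbers i)
        ((numbers.drop i).take (j - i)) (numbers.drop j) = some (v + m) := by
  obtain ⟨h1, h2, h3, h4⟩ := hk
  intro d
  induction d with
  | zero => intro j hd; omega
  | succ d ih =>
    intro j hd hij hjk hinv
    have hjlen : j < numbers.length := by omega
    have hdropj : numbers.drop j = numbers[j] :: numbers.drop (j + 1) :=
      List.drop_eq_getElem_cons hjlen
    rw [hdropj]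
    have hsum : PS numbers j - PS numbers i + numbers[j] = PS numbers (j + 1) - PS numbers i := by
      rw [PS_succ numbers j hjlen]; ring
    have hwin := window_take_succ numbers i j (by omega) hjlen
    by_cases hjk1 : j + 1 = k
    · have heq : PS numbers j - PS numbers i + numbers[j] = target := by
        rw [hsum, hjk1, h3]; ring
      rw [part2InnerA, if_pos heq, hwin, hjk1, hm]
    · have hlt : PS numbers (j + 1) < PS numbers i + target :=
        h4 (j + 1) (by omega) (by omega)
      have hne : ¬ (PS numbers j - PS numbers i + numbers[j] = target) := by
        rw [hsum]; omega
      have hngt : ¬ (PS numbers j - PS numbers i + numbers[j] > target) := by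
        rw [hsum]; omega
      rw [part2InnerA, if_neg hne, if_neg hngt, hwin, hsum]
      exact ih (j + 1) (by omega) (by omega) (by omega)
        (fun m' hm1 hm2 => by
          rcases Nat.lt_or_ge m' (j + 1) with h | h
          · exact hinv m' hm1 (by omega)
          · have : m' = j + 1 := by omega
            rw [this]; exact hlt)

lemma innerA_none (numbers : List Int) (target : Int) (i : Nat)
    (hno : ∀ k, ¬ HitP numbers target i k) (v : Int) :
    ∀ (d j : Nat), numbers.length - j = d → i + 1 ≤ j → j ≤ numbers.length →
      (∀ m', i + 2 ≤ m' → m' ≤ j → PS numbers m' < PS numbers i + target) →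
      part2InnerA target v (PS numbers j - PS numbers i)
        ((numbers.drop i).take (j - i)) (numbers.drop j) = none := by
  intro d
  induction d with
  | zero =>
    intro j hd hij hjn hinv
    have : j = numbers.length := by omega
    rw [this, List.drop_length, part2InnerA]
  | succ d ih =>
    intro j hd hij hjn hinv
    have hjlen : j < numbers.length := by omega
    have hdropj : numbers.drop j = numbers[j] :: numbers.drop (j + 1) :=
      List.drop_eq_getElem_cons hjlen
    rw [hdropj]
    have hsum : PS numbers j - PS numbers i + numbers[j] = PS numbers (j + 1) - PS numbers i := by
      rw [PS_succ numbers j hjlen]; ring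
    have hwin := window_take_succ numbers i j (by omega) hjlen
    by_cases heq : PS numbers j - PS numbers i + numbers[j] = target
    · exfalso
      apply hno (j + 1)
      refine ⟨by omega, by omega, by omega, ?_⟩
      intro m' hm1 hm2
      exact hinv m' hm1 (by omega)
    · by_cases hgt : PS numbers j - PS numbers i + numbers[j] > target
      · rw [part2InnerA, if_neg heq, if_pos hgt]
      · rw [part2InnerA, if_neg heq, if_neg hgt, hwin, hsum]
        exact ih (j + 1) (by omega) (by omega) (by omega)
          (fun m' hm1 hm2 => by
            rcases Nat.lt_or_ge m' (j + 1) with h | h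
            · exact hinv m' hm1 (by omega)
            · have : m' = j + 1 := by omega
              rw [this]; omega)

-- ===== B's per-start lookup vs HitP =====

-- the root query at start i, characterised against HitP
lemma rootQuery (numbers : List Int) (target : Int) (i : Nat) (hi : i < numbers.length) :
    (match firstAtLeast (buildT (buildPrefixB numbers) 0 (numbers.length + 1)) 0
        (numbers.length + 1) (i + 2) (PS numbers i + target) with
     | some k => if (buildPrefixB numbers).getD k 0 = PS numbers i + target
         then HitP numbers target i k
         else ∀ k', ¬ HitP numbers target i k'
     | none => ∀ k', ¬ HitP numbers target i k') := by
  have hspec := firstAtLeast_spec (buildPrefixB numbers) (PS numbers i + target) (i + 2)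
    (numbers.length + 1) 0 (numbers.length + 1) le_rfl (by omega)
  cases hq : firstAtLeast (buildT (buildPrefixB numbers) 0 (numbers.length + 1)) 0
      (numbers.length + 1) (i + 2) (PS numbers i + target) with
  | some k =>
    rw [hq] at hspec
    dsimp only at hspec ⊢
    obtain ⟨_, hk1, hk2, hk3, hk4⟩ := hspec
    have hkn : k ≤ numbers.length := by omega
    rw [getD_buildPrefixB numbers k hkn] at hk3 ⊢
    by_cases heq : PS numbers k = PS numbers i + target
    · rw [if_pos heq]
      refine ⟨hk1, hkn, heq, ?_⟩
      intro m hm1 hm2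
      have := hk4 m (by omega) hm1 hm2
      rwa [getD_buildPrefixB numbers m (by omega)] at this
    · rw [if_neg heq]
      intro k' hk'
      obtain ⟨h1', h2', h3', h4'⟩ := hk'
      rcases Nat.lt_trichotomy k' k with h | h | h
      · have := hk4 k' (by omega) h1' h
        rw [getD_buildPrefixB numbers k' h2'] at this
        omega
      · exact heq (h ▸ h3')
      · have := h4' k (by omega) h
        omega
  | none =>
    rw [hq] at hspec
    intro k' hk'
    obtain ⟨h1', h2', h3', _⟩ := hk'
    have := hspec k' (by omega) h1' (by omega)
    rw [getD_buildPrefixB numbers k' h2'] at this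
    omega

-- ===== outer bridge =====

lemma bridge (numbers : List Int) (target : Int) :
    ∀ (d i : Nat), numbers.length - i = d →
      part2OuterA target (numbers.drop i) =
      part2OuterB numbers target (buildPrefixB numbers)
        (buildT (buildPrefixB numbers) 0 (numbers.length + 1)) numbers.length
        (List.range' i (numbers.length - i)) := by
  intro d
  induction d with
  | zero =>
    intro i hd
    rw [hd, List.range'_zero]
    have : numbers.drop i = [] := List.drop_eq_nil_of_le (by omega)
    rw [this, part2OuterA, part2OuterB]
  | succ d ih =>
    intro i hd
    have hilen : i < numbers.length := by omega
    have hrange : List.range' i (numbers.length - i) =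
        i :: List.range' (i + 1) (numbers.length - (i + 1)) := by
      have h1 : numbers.length - i = (numbers.length - (i + 1)) + 1 := by omega
      rw [h1, List.range'_succ]
    rw [hrange]
    have hdropi : numbers.drop i = numbers[i] :: numbers.drop (i + 1) :=
      List.drop_eq_getElem_cons hilen
    rw [hdropi, part2OuterA, part2OuterB]
    have hpgetD : (buildPrefixB numbers).getD i 0 = PS numbers i :=
      getD_buildPrefixB numbers i (by omega)
    have hinit_tot : numbers[i] = PS numbers (i + 1) - PS numbers i := by
      rw [PS_succ numbers i hilen]; ring
    have hinit_nums : [numbers[i]] = (numbers.drop i).take ((i + 1) - i) := by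
      have h1 : i + 1 - i = 1 := by omega
      rw [h1, hdropi, List.take_succ_cons, List.take_zero]
    have hroot := rootQuery numbers target i hilen
    simp only [hpgetD]
    cases hq : firstAtLeast (buildT (buildPrefixB numbers) 0 (numbers.length + 1)) 0
        (numbers.length + 1) (i + 2) (PS numbers i + target) with
    | some k =>
      rw [hq] at hroot
      dsimp only at hroot ⊢
      by_cases heq : (buildPrefixB numbers).getD k 0 = PS numbers i + target
      · rw [if_pos heq] at hroot
        rw [if_pos heq]
        have hk := hroot
        have hk1 : i + 2 ≤ k := hk.1
        have hwinne : (numbers.drop i).take (k - i) ≠ [] := by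
          intro hnil
          rcases List.take_eq_nil_iff.mp hnil with h | h
          · omega
          · have := List.drop_eq_nil_iff.mp h
            have hk2 := hk.2.1
            omega
        obtain ⟨m, hm⟩ : ∃ m, PySem.List.max? ((numbers.drop i).take (k - i)) (fun y => y) = some m := by
          cases hcase : PySem.List.max? ((numbers.drop i).take (k - i)) (fun y => y) with
          | none => exact absurd ((PySem.List.max?_eq_none_iff _ _).mp hcase) hwinne
          | some m => exact ⟨m, rfl⟩
        have hA : part2InnerA target numbers[i] numbers[i] [numbers[i]] (numbers.drop (i + 1)) =
            some (numbers[i] + m) := by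
          have := innerA_hit numbers target i k hk m numbers[i] hm (k - (i + 1)) (i + 1)
            rfl (by omega) (by omega) (by intro m' h1 h2; omega)
          rw [← hinit_tot, ← hinit_nums] at this
          exact this
        rw [hA, hm]
        have hgd : numbers.getD i 0 = numbers[i] := by
          rw [List.getD_eq_getElem?_getD, List.getElem?_eq_getElem hilen]
          rfl
        rw [hgd]
      · rw [if_neg heq] at hroot
        rw [if_neg heq]
        have hA : part2InnerA target numbers[i] numbers[i] [numbers[i]] (numbers.drop (i + 1)) = none := by
          have := innerA_none numbers target i hroot numbers[i] (numbers.length - (i + 1)) (i + 1)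
            rfl (by omega) (by omega) (by intro m' h1 h2; omega)
          rw [← hinit_tot, ← hinit_nums] at this
          exact this
        rw [hA]
        exact ih (i + 1) (by omega)
    | none =>
      rw [hq] at hroot
      dsimp only at hroot ⊢
      have hA : part2InnerA target numbers[i] numbers[i] [numbers[i]] (numbers.drop (i + 1)) = none := by
        have := innerA_none numbers target i hroot numbers[i] (numbers.length - (i + 1)) (i + 1)
          rfl (by omega) (by omega) (by intro m' h1 h2; omega)
        rw [← hinit_tot, ← hinit_nums] at this
        exact this
      rw [hA]
      exact ih (i + 1) (by omega)

-- ===== VERDICT (by name: the statement is the Claim_ definition above) =====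
theorem part2_spec : Claim_equal_part2 := by
  intro numbers target _
  unfold Spec_part2 part2 part2_alt
  have := bridge numbers target numbers.length 0 rfl
  simpa [List.range_eq_range'] using this
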